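-- pv_equiv track=rewrite | github.com/Rorro3/IntroALaProgramacion | guia-7-listas-en-python/ej1.py | pos_secuencia_mas_larga
-- ===== SOURCE A (Python) =====
-- def pos_secuencia_mas_larga(lista: list[int]) -> int:
--     mejor_inicio = 0
--     mejor_longitud = 1
--
--     inicio_actual = 0
--     longitud_actual = 1
--
--     for i in range(1, len(lista)):
--         if lista[i] >= lista[i - 1]:
--             longitud_actual += 1 #le pongo la cantidad de numeros ordenados que hay en la primer secuencia
--         else:
--             if longitud_actual > mejor_longitud:
--                 mejor_longitud = longitud_actual #la mejor longitud va a ser la mas larga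
--                 mejor_inicio = inicio_actual #el inicio sigue siendo el 0
--             inicio_actual = i #aca se sale del if, es lo que pasa cuando el if no hace nada (me pone el i como nuevo inicio cuando haga lista[i])
--             longitud_actual = 1 #porque si no es mas grande que la mejor sigue siendo 1
--     if longitud_actual > mejor_longitud: #aca por si justo estaba al final de la lista, si pasa esto no entra ni siquiera en el else
--         mejor_inicio = inicio_actual
--     return mejor_inicio
-- ===== SOURCE B (Python) =====
-- def pos_secuencia_mas_larga(lista: list[int]) -> int:
--     # Phase 1: collect maximal non-decreasing runs as (start_index, length).
--     runs = []
--     start, length = 0, 1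
--     for i in range(1, len(lista)):
--         if lista[i] >= lista[i - 1]:
--             length += 1
--         else:
--             runs.append((start, length))
--             start, length = i, 1
--     if lista:
--         runs.append((start, length))
--     # Phase 2: first run with strictly greatest length wins.
--     best = (0, 0)
--     for r in runs:
--         if r[1] > best[1]:
--             best = r
--     return best[0]
-- ===== Notes on version B (the rewrite author's own statement) =====
-- stated objective: alternative
-- what changed: A tracks the best run online inside one fused loop with a trailing fix-up comparison; B first materialises the list of maximal non-decreasing runs as (start, length) pairs and then selects the first longest run in a separate pass.
import Mathlib
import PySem

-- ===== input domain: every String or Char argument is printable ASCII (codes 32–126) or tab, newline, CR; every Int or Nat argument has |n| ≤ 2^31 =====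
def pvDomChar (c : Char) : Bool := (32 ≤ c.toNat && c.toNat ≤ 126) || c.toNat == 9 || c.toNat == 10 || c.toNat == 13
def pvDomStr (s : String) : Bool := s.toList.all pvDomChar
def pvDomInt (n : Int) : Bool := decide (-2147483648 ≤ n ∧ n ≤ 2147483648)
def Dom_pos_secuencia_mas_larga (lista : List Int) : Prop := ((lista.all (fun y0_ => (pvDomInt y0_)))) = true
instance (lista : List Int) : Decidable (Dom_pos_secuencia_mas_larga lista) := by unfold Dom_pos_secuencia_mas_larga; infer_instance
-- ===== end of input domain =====

-- B materialises the maximal non-decreasing runs as (start, length) pairs and then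
-- selects the first longest one, instead of A's fused online best-tracking loop.

-- ===== PORT A =====
-- one loop iteration of A: state = ((mejor_inicio, mejor_longitud), (inicio_actual, longitud_actual))
def stepA (lista : List Int) (st : (Int × Int) × (Int × Int)) (i : Int) : (Int × Int) × (Int × Int) :=
  if PySem.List.pyGetD lista i 0 ≥ PySem.List.pyGetD lista (i - 1) 0 then
    (st.1, (st.2.1, st.2.2 + 1))
  else
    (if st.2.2 > st.1.2 then st.2 else st.1, (i, 1))

-- A's trailing 'if longitud_actual > mejor_longitud' and return
def finishA (st : (Int × Int) × (Int × Int)) : Int :=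
  if st.2.2 > st.1.2 then st.2.1 else st.1.1

def pos_secuencia_mas_larga (lista : List Int) : Int :=
  finishA ((PySem.List.pyRange 1 (lista.length : Int) 1).foldl (stepA lista) ((0, 1), (0, 1)))

-- ===== PORT B =====
-- Phase 1 of B: collect the maximal non-decreasing runs as (start, length),
-- walking the tail with the previous element and current run (start, len) at index i.
def runsAux (prev start len i : Int) : List Int → List (Int × Int)
  | [] => [(start, len)]
  | x :: rest =>
    if x ≥ prev then runsAux x start (len + 1) (i + 1) rest
    else (start, len) :: runsAux x i 1 (i + 1) rest

def runsOf (lista : List Int) : List (Int × Int) :=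
  match lista with
  | [] => []
  | x :: rest => runsAux x 0 1 1 rest

-- Phase 2 of B: first run with strictly greatest length
def selStep (b r : Int × Int) : Int × Int := if r.2 > b.2 then r else b

def pos_secuencia_mas_larga_alt (lista : List Int) : Int :=
  ((runsOf lista).foldl selStep (0, 0)).1

-- ===== PRECONDITION & SPEC =====
def Spec_pos_secuencia_mas_larga (lista : List Int) (out : Int) : Prop := out = pos_secuencia_mas_larga_alt lista
instance (lista : List Int) (out : Int) : Decidable (Spec_pos_secuencia_mas_larga lista out) := by unfold Spec_pos_secuencia_mas_larga; infer_instance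

-- ===== CLAIM (what is proved, stated in full; the proofs are below) =====
def Claim_equal_pos_secuencia_mas_larga : Prop := ∀ (lista : List Int), Dom_pos_secuencia_mas_larga lista → Spec_pos_secuencia_mas_larga lista (pos_secuencia_mas_larga lista)

-- ===== LEMMAS AND PROOFS =====

theorem getD_append_len {pre : List Int} {y : Int} {rest : List Int} {d : Int} :
    (pre ++ y :: rest).getD pre.length d = y := by
  induction pre with
  | nil => rfl
  | cons a t ih => exact ih

-- main invariant: A's fold over the remaining indices, finished by one more
-- selection step on its (best, current) state, equals B's selection fold over
-- the runs of the remaining tail.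
theorem loop_eq (rest : List Int) : ∀ (pre : List Int) (y : Int) (b : Int × Int) (s l : Int),
    selStep
      (((PySem.List.pyRange ((pre.length : Int) + 1) ((pre ++ y :: rest).length : Int) 1).foldl
        (stepA (pre ++ y :: rest)) (b, (s, l))).1)
      (((PySem.List.pyRange ((pre.length : Int) + 1) ((pre ++ y :: rest).length : Int) 1).foldl
        (stepA (pre ++ y :: rest)) (b, (s, l))).2)
    = (runsAux y s l ((pre.length : Int) + 1) rest).foldl selStep b := by
  induction rest with
  | nil =>
    intro pre y b s l
    have hn : PySem.List.pyRange ((pre.length : Int) + 1) ((pre ++ y :: ([] : List Int)).length : Int) 1 = [] :=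
      PySem.List.pyRange_one_eq_nil (by
        simp only [List.length_append, List.length_cons, List.length_nil]; push_cast; omega)
    rw [hn]
    simp [runsAux, selStep]
  | cons x rest ih =>
    intro pre y b s l
    have hlen : ((pre.length : Int) + 1) < ((pre ++ y :: x :: rest).length : Int) := by
      simp only [List.length_append, List.length_cons]; push_cast; omega
    rw [PySem.List.pyRange_one_cons hlen]
    simp only [List.foldl_cons]
    have hx : PySem.List.pyGetD (pre ++ y :: x :: rest) ((pre.length : Int) + 1) 0 = x := by
      have h1 : ((pre.length : Int) + 1) = ((pre.length + 1 : Nat) : Int) := by push_cast; ring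
      rw [h1, PySem.List.pyGetD_natCast]
      have h2 : (pre ++ y :: x :: rest) = ((pre ++ [y]) ++ x :: rest) := by simp
      rw [h2]
      have hl : (pre ++ [y]).length = pre.length + 1 := by simp
      rw [← hl]; exact getD_append_len
    have hy : PySem.List.pyGetD (pre ++ y :: x :: rest) ((pre.length : Int) + 1 - 1) 0 = y := by
      have h1 : ((pre.length : Int) + 1 - 1) = ((pre.length : Nat) : Int) := by ring
      rw [h1, PySem.List.pyGetD_natCast]
      exact getD_append_len
    have hre : pre ++ y :: x :: rest = (pre ++ [y]) ++ x :: rest := by simp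
    have h2 : ((pre ++ [y]).length : Int) + 1 = (pre.length : Int) + 1 + 1 := by
      simp only [List.length_append, List.length_cons, List.length_nil]; push_cast; omega
    by_cases hc : x ≥ y
    · have hstep : stepA (pre ++ y :: x :: rest) (b, (s, l)) ((pre.length : Int) + 1)
          = (b, (s, l + 1)) := by
        simp [stepA, hx, hc]
      rw [hstep]
      have hih := ih (pre ++ [y]) x b s (l + 1)
      rw [h2] at hih
      rw [hre, hih]
      simp [runsAux, hc]
    · have hstep : stepA (pre ++ y :: x :: rest) (b, (s, l)) ((pre.length : Int) + 1)
          = (selStep b (s, l), ((pre.length : Int) + 1, 1)) := by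
        simp [stepA, hx, hc, selStep]
      rw [hstep]
      have hih := ih (pre ++ [y]) x (selStep b (s, l)) ((pre.length : Int) + 1) 1
      rw [h2] at hih
      rw [hre, hih]
      simp [runsAux, hc]

-- the first run produced by runsAux keeps its start and only grows its length
theorem runsAux_head (rest : List Int) : ∀ (prev s l i : Int),
    ∃ k rs, runsAux prev s l i rest = (s, l + k) :: rs ∧ 0 ≤ k := by
  induction rest with
  | nil => intro prev s l i; exact ⟨0, [], by simp [runsAux], le_refl 0⟩
  | cons x rest ih =>
    intro prev s l i
    by_cases hc : x ≥ prev
    · obtain ⟨k, rs, hk, hk0⟩ := ih x s (l + 1) (i + 1)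
      refine ⟨k + 1, rs, ?_, by omega⟩
      simp only [runsAux, if_pos hc]
      rw [hk]; ring_nf
    · exact ⟨0, runsAux x i 1 (i + 1) rest, by simp [runsAux, hc], le_refl 0⟩

-- ===== VERDICT (by name: the statement is the Claim_ definition above) =====
theorem pos_secuencia_mas_larga_spec : Claim_equal_pos_secuencia_mas_larga := by
  unfold Claim_equal_pos_secuencia_mas_larga
  intro lista _
  unfold Spec_pos_secuencia_mas_larga
  cases lista with
  | nil => rfl
  | cons x rest =>
    unfold pos_secuencia_mas_larga pos_secuencia_mas_larga_alt
    have hfin : ∀ st : (Int × Int) × (Int × Int), finishA st = (selStep st.1 st.2).1 := by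
      intro st; unfold finishA selStep; split_ifs <;> rfl
    rw [hfin]
    have h := loop_eq rest [] x ((0 : Int), (1 : Int)) 0 1
    simp only [List.length_nil, Nat.cast_zero, zero_add, List.nil_append] at h
    have hro : runsOf (x :: rest) = runsAux x 0 1 1 rest := rfl
    rw [hro, h]
    obtain ⟨k, rs, hk, hk0⟩ := runsAux_head rest x 0 1 1
    rw [hk]
    simp only [List.foldl_cons]
    have hfix : selStep ((0 : Int), (1 : Int)) (0, 1 + k) = selStep ((0 : Int), (0 : Int)) (0, 1 + k) := by
      unfold selStep
      by_cases h1 : k > 0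
      · rw [if_pos (by omega), if_pos (by omega)]
      · have hk' : k = 0 := by omega
        subst hk'
        rw [if_neg (by omega), if_pos (by omega)]; norm_num
    rw [hfix]
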